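-- pv_equiv track=rewrite | github.com/Vinojithab17/Programming_Challenge | 44/44.py | largest_prime_sum_indices
-- ===== SOURCE A (Python) =====
-- def is_prime(number):
--     if number <= 1:
--         return False
--     for i in range(2, int(number**0.5) + 1):
--         if number % i == 0:
--             return False
--     return True
--
-- def largest_prime_sum_indices(nums):
--     largest_prime = -1
--     indices = None
--
--     for i in range(len(nums)):
--         for j in range(i + 1, len(nums)):
--             current_sum = nums[i] + nums[j]
--             if is_prime(current_sum) and current_sum > largest_prime:
--                 largest_prime = current_sum
--                 indices = (i, j)
--
--     return indices
-- ===== SOURCE B (Python) =====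
-- # B: materialise all index pairs, stable-sort them by sum descending, return the first prime-sum pair.
-- def is_prime(number):
--     if number <= 1:
--         return False
--     for i in range(2, int(number**0.5) + 1):
--         if number % i == 0:
--             return False
--     return True
--
-- def largest_prime_sum_indices(nums):
--     n = len(nums)
--     cands = [(nums[i] + nums[j], i, j) for i in range(n) for j in range(i + 1, n)]
--     cands = sorted(cands, key=lambda t: t[0], reverse=True)
--     for s, i, j in cands:
--         if is_prime(s):
--             return (i, j)
--     return None
-- ===== Notes on version B (the rewrite author's own statement) =====
-- stated objective: alternative
-- what changed: Replaces the nested-loop running maximum (with a primality test on every pair) by generate-all-pairs, stable sort by sum descending, then scan for the first prime sum; stability of the sort reproduces A's first-in-iteration-order tie-break.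
import Mathlib
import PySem

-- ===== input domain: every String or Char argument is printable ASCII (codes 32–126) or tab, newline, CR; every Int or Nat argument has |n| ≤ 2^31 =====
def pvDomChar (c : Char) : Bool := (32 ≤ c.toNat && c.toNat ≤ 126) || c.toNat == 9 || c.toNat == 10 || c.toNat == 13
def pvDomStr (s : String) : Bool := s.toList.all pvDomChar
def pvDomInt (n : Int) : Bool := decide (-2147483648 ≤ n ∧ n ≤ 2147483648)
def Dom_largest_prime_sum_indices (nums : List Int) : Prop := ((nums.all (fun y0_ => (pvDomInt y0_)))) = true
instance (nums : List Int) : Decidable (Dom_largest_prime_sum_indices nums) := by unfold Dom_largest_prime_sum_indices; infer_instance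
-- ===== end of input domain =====

-- B replaces A's nested-loop running maximum by: build all index pairs, stable-sort by sum
-- descending, return the first pair whose sum is prime (alternative algorithm, same results).


-- ===== PORT A =====
-- is_prime; int(number**0.5) is ported as Nat.sqrt, exact for the 0 ≤ number ≤ 2^32 reachable
-- here (a double sqrt cannot round across an integer in that range).
def isPrime (number : Int) : Bool :=
  if number ≤ 1 then false
  else
    (PySem.List.pyRange 2 (((Nat.sqrt number.toNat) : Int) + 1) 1).all
      (fun i => !(PySem.Int.mod number i == 0))

def largest_prime_sum_indices (nums : List Int) : Option (Int × Int) :=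
  let st := (PySem.List.pyRange 0 (nums.length : Int) 1).foldl
    (fun st i =>
      (PySem.List.pyRange (i + 1) (nums.length : Int) 1).foldl
        (fun st j =>
          let current_sum := PySem.List.pyGetD nums i 0 + PySem.List.pyGetD nums j 0
          if isPrime current_sum && decide (st.1 < current_sum) then (current_sum, some (i, j))
          else st)
        st)
    ((-1 : Int), (none : Option (Int × Int)))
  st.2

-- ===== PORT B =====
def largest_prime_sum_indices_alt (nums : List Int) : Option (Int × Int) :=
  let cands := (PySem.List.pyRange 0 (nums.length : Int) 1).foldl
    (fun acc i => acc ++ (PySem.List.pyRange (i + 1) (nums.length : Int) 1).map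
      (fun j => (PySem.List.pyGetD nums i 0 + PySem.List.pyGetD nums j 0, i, j))) []
  let sortedCands := PySem.List.sorted cands (fun t => t.1) true
  (sortedCands.find? (fun t => isPrime t.1)).map (fun t => t.2)

-- ===== PRECONDITION & SPEC =====
def Spec_largest_prime_sum_indices (nums : List Int) (out : Option (Int × Int)) : Prop := out = largest_prime_sum_indices_alt nums
instance (nums : List Int) (out : Option (Int × Int)) : Decidable (Spec_largest_prime_sum_indices nums out) := by unfold Spec_largest_prime_sum_indices; infer_instance

-- ===== CLAIM (what is proved, stated in full; the proofs are below) =====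
def Claim_equal_largest_prime_sum_indices : Prop := ∀ (nums : List Int), Dom_largest_prime_sum_indices nums → Spec_largest_prime_sum_indices nums (largest_prime_sum_indices nums)

-- ===== LEMMAS AND PROOFS =====

-- A's loop body as a step over a flattened pair list (proof-side helper).
def pvStep (st : Int × Option (Int × Int)) (t : Int × Int × Int) : Int × Option (Int × Int) :=
  if isPrime t.1 && decide (st.1 < t.1) then (t.1, some t.2) else st

-- The flat list of (sum, i, j) candidates, shared shape of both ports.
def pvPairs (nums : List Int) : List (Int × Int × Int) :=
  (PySem.List.pyRange 0 (nums.length : Int) 1).flatMap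
    (fun i => (PySem.List.pyRange (i + 1) (nums.length : Int) 1).map
      (fun j => (PySem.List.pyGetD nums i 0 + PySem.List.pyGetD nums j 0, i, j)))

lemma isPrime_pos {s : Int} (h : isPrime s = true) : (-1 : Int) < s := by
  by_cases h1 : s ≤ 1
  · rw [isPrime, if_pos h1] at h
    exact Bool.noConfusion h
  · omega

lemma find?_insertBy (p : Int × Int × Int → Bool) (x : Int × Int × Int)
    (ys : List (Int × Int × Int)) (hs : ys.Pairwise (fun a b => b.1 ≤ a.1)) :
    (PySem.List.insertBy (fun a b => decide (b.1 < a.1)) x ys).find? p =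
      match ys.find? p with
      | none => if p x then some x else none
      | some r => if p x && decide (r.1 < x.1) then some x else some r := by
  induction ys with
  | nil => simp [PySem.List.insertBy, List.find?]
  | cons y ys ih =>
    rcases List.pairwise_cons.mp hs with ⟨hy, htl⟩
    by_cases hlt : y.1 < x.1
    · -- x is inserted in front of y :: ys
      have hins : PySem.List.insertBy (fun a b => decide (b.1 < a.1)) x (y :: ys) =
          x :: y :: ys := by
        simp [PySem.List.insertBy, hlt]
      rw [hins]
      by_cases hpx : p x
      · rw [List.find?_cons_of_pos (h := hpx)]
        cases hr : (y :: ys).find? p with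
        | none => simp [hpx]
        | some r =>
          have hrm : r ∈ y :: ys := List.mem_of_find?_eq_some hr
          have hrx : r.1 < x.1 := by
            rcases List.mem_cons.mp hrm with h' | h'
            · exact h' ▸ hlt
            · exact lt_of_le_of_lt (hy r h') hlt
          simp [hpx, hrx]
      · rw [List.find?_cons_of_neg (h := by simp [hpx])]
        cases hr : (y :: ys).find? p with
        | none => simp [hpx]
        | some r => simp [hpx]
    · -- x goes after y
      have hins : PySem.List.insertBy (fun a b => decide (b.1 < a.1)) x (y :: ys) =
          y :: PySem.List.insertBy (fun a b => decide (b.1 < a.1)) x ys := by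
        simp [PySem.List.insertBy, hlt]
      rw [hins]
      by_cases hpy : p y
      · rw [List.find?_cons_of_pos (h := hpy), List.find?_cons_of_pos (h := hpy)]
        have : ¬ (x.1 > y.1) := hlt
        simp [show ¬ (y.1 < x.1) from hlt]
      · rw [List.find?_cons_of_neg (h := by simp [hpy]), List.find?_cons_of_neg (h := by simp [hpy]),
          ih htl]

lemma sorted_rev_snoc (xs : List (Int × Int × Int)) (x : Int × Int × Int) :
    PySem.List.sorted (xs ++ [x]) (fun t => t.1) true =
      PySem.List.insertBy (fun a b => decide (b.1 < a.1)) x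
        (PySem.List.sorted xs (fun t => t.1) true) := by
  rw [PySem.List.sorted_rev_eq_foldl_insertBy, PySem.List.sorted_rev_eq_foldl_insertBy,
    List.foldl_append]
  rfl

lemma loop_eq_sorted_find (xs : List (Int × Int × Int)) :
    xs.foldl pvStep ((-1 : Int), (none : Option (Int × Int))) =
      (((((PySem.List.sorted xs (fun t => t.1) true).find? (fun t => isPrime t.1)).map
          (fun t => t.1)).getD (-1)),
        (((PySem.List.sorted xs (fun t => t.1) true).find? (fun t => isPrime t.1)).map
          (fun t => t.2))) := by
  induction xs using List.reverseRecOn with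
  | nil => simp [PySem.List.sorted]
  | append_singleton xs x ih =>
    rw [List.foldl_append, ih, sorted_rev_snoc,
      find?_insertBy _ _ _ (PySem.List.sorted_pairwise_rev xs (fun t => t.1))]
    cases hr : (PySem.List.sorted xs (fun t => t.1) true).find? (fun t => isPrime t.1) with
    | none =>
      by_cases hpx : isPrime x.1
      · simp [pvStep, hpx, isPrime_pos hpx]
      · simp [pvStep, hpx]
    | some r =>
      by_cases hpx : isPrime x.1
      · by_cases hlt : r.1 < x.1
        · simp [pvStep, hpx, hlt]
        · simp [pvStep, hpx, hlt]
      · simp [pvStep, hpx]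

lemma a_eq_fold (nums : List Int) :
    largest_prime_sum_indices nums = ((pvPairs nums).foldl pvStep ((-1 : Int), none)).2 := by
  unfold largest_prime_sum_indices pvPairs pvStep
  rw [List.flatMap_def, List.foldl_flatten, List.foldl_map]
  simp only [List.foldl_map]

lemma b_eq_sorted_find (nums : List Int) :
    largest_prime_sum_indices_alt nums =
      (((PySem.List.sorted (pvPairs nums) (fun t => t.1) true).find? (fun t => isPrime t.1)).map
        (fun t => t.2)) := by
  unfold largest_prime_sum_indices_alt pvPairs
  rw [PySem.List.foldl_append_eq_flatMap]
  rfl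

-- ===== VERDICT (by name: the statement is the Claim_ definition above) =====
theorem largest_prime_sum_indices_spec : Claim_equal_largest_prime_sum_indices := by
  intro nums _
  show largest_prime_sum_indices nums = largest_prime_sum_indices_alt nums
  rw [a_eq_fold, loop_eq_sorted_find, b_eq_sorted_find]
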